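-- pv_equiv track=rewrite | github.com/cross-codes/BinPacking | algorithm/SA5.py | dilate_mask
-- ===== SOURCE A (Python) =====
-- def dilate_mask(mask, blocked, plot_w, plot_h, target_width):
--     if target_width <= 1:
--         return set(mask)
--     radius = max(0, (target_width - 1) // 2)
--     cur = set(mask)
--     for _ in range(radius):
--         new = set(cur)
--         for x, y in cur:
--             for dx, dy in ((1, 0), (-1, 0), (0, 1), (0, -1)):
--                 nx, ny = x + dx, y + dy
--                 if 0 <= nx < plot_w and 0 <= ny < plot_h and (nx, ny) not in blocked:
--                     new.add((nx, ny))
--         cur = new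
--     return cur
-- ===== SOURCE B (Python) =====
-- def dilate_mask(mask, blocked, plot_w, plot_h, target_width):
--     # Multi-source BFS: each round expands only the current frontier layer.
--     visited = set(mask)
--     if target_width <= 1:
--         return visited
--     radius = max(0, (target_width - 1) // 2)
--     blocked_set = set(blocked)
--     frontier = list(dict.fromkeys(mask))
--     for _ in range(radius):
--         if not frontier:
--             break
--         nxt = []
--         for x, y in frontier:
--             for q in ((x + 1, y), (x - 1, y), (x, y + 1), (x, y - 1)):
--                 if 0 <= q[0] < plot_w and 0 <= q[1] < plot_h and q not in blocked_set and q not in visited: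
--                     visited.add(q)
--                     nxt.append(q)
--         frontier = nxt
--     return visited
-- ===== Notes on version B (the rewrite author's own statement) =====
-- stated objective: faster
-- what changed: Replaced the per-round re-scan of the whole dilated set with a multi-source BFS that expands only the newest frontier layer each round (set for blocked, early exit on empty frontier); intended as faster and measured well ahead (e.g. ~27x at n=256, A often timing out where B returns), though on the very largest grids both can time out.
import Mathlib
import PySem

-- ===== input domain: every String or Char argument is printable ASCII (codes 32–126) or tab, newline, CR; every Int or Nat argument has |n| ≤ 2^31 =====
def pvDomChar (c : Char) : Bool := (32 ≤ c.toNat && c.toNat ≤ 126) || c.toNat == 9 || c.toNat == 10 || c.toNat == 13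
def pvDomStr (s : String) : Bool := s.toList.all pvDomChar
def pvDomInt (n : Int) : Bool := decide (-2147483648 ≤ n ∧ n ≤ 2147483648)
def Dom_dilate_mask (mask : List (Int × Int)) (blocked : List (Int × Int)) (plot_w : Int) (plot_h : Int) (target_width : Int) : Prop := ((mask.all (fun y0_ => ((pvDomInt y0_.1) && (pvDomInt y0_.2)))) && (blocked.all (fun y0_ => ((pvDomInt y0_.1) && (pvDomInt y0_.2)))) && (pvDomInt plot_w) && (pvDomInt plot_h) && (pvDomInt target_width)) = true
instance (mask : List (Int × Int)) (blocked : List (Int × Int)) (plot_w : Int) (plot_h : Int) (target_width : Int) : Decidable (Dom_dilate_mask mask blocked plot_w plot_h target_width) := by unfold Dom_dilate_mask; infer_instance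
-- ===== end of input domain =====

-- B replaces A's per-round re-scan of the whole dilated set with a multi-source BFS that
-- expands only the newest frontier layer each round (intended as faster; a timing run
-- measured B well ahead at every size both finished, e.g. ~27x at n=256; on the very
-- largest generated grids both implementations can time out).

-- ===== PORT A =====
def pvDirs : List (Int × Int) := [(1, 0), (-1, 0), (0, 1), (0, -1)]

-- inner double loop of one round: try the four neighbours of p, adding the valid ones to new
def pvAStep (blocked : List (Int × Int)) (plot_w plot_h : Int)
    (new : PySem.Set (Int × Int)) (p : Int × Int) : PySem.Set (Int × Int) :=
  pvDirs.foldl (fun new d =>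
    let nx := p.1 + d.1
    let ny := p.2 + d.2
    if 0 ≤ nx ∧ nx < plot_w ∧ 0 ≤ ny ∧ ny < plot_h ∧ (nx, ny) ∉ blocked then
      PySem.Set.add new (nx, ny)
    else new) new

-- one round: new = set(cur); for (x, y) in cur: …; cur = new
def pvARound (blocked : List (Int × Int)) (plot_w plot_h : Int)
    (cur : PySem.Set (Int × Int)) : PySem.Set (Int × Int) :=
  cur.foldl (pvAStep blocked plot_w plot_h) (PySem.Set.ofList cur)

def pvALoop (blocked : List (Int × Int)) (plot_w plot_h : Int) :
    Nat → PySem.Set (Int × Int) → PySem.Set (Int × Int)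
  | 0, cur => cur
  | n + 1, cur => pvALoop blocked plot_w plot_h n (pvARound blocked plot_w plot_h cur)

def dilate_mask (mask : List (Int × Int)) (blocked : List (Int × Int)) (plot_w : Int) (plot_h : Int) (target_width : Int) : List (Int × Int) :=
  if target_width ≤ 1 then PySem.Set.ofList mask
  else
    let radius := max 0 (PySem.Int.floordiv (target_width - 1) 2)
    pvALoop blocked plot_w plot_h radius.toNat (PySem.Set.ofList mask)

-- ===== PORT B =====
-- body of B's frontier loop: try the four neighbours of p; fresh valid cells are added to
-- visited (st.1) and appended to nxt (st.2)
def pvBStep (bl : PySem.Set (Int × Int)) (plot_w plot_h : Int)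
    (st : PySem.Set (Int × Int) × List (Int × Int)) (p : Int × Int) :
    PySem.Set (Int × Int) × List (Int × Int) :=
  [(p.1 + 1, p.2), (p.1 - 1, p.2), (p.1, p.2 + 1), (p.1, p.2 - 1)].foldl (fun st q =>
    if (0 ≤ q.1 ∧ q.1 < plot_w ∧ 0 ≤ q.2 ∧ q.2 < plot_h ∧ q ∉ bl) ∧ q ∉ st.1 then
      (PySem.Set.add st.1 q, st.2 ++ [q])
    else st) st

def pvBLoop (bl : PySem.Set (Int × Int)) (plot_w plot_h : Int) :
    Nat → PySem.Set (Int × Int) × List (Int × Int) → PySem.Set (Int × Int)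
  | 0, st => st.1
  | n + 1, st =>
    if st.2.isEmpty then st.1
    else pvBLoop bl plot_w plot_h n (st.2.foldl (pvBStep bl plot_w plot_h) (st.1, []))

def dilate_mask_alt (mask : List (Int × Int)) (blocked : List (Int × Int)) (plot_w : Int) (plot_h : Int) (target_width : Int) : List (Int × Int) :=
  let visited := PySem.Set.ofList mask
  if target_width ≤ 1 then visited
  else
    let radius := max 0 (PySem.Int.floordiv (target_width - 1) 2)
    let bl := PySem.Set.ofList blocked
    pvBLoop bl plot_w plot_h radius.toNat (visited, PySem.List.dedup mask)

-- ===== PRECONDITION & SPEC =====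
def Spec_dilate_mask (mask : List (Int × Int)) (blocked : List (Int × Int)) (plot_w : Int) (plot_h : Int) (target_width : Int) (out : List (Int × Int)) : Prop := out = dilate_mask_alt mask blocked plot_w plot_h target_width
instance (mask : List (Int × Int)) (blocked : List (Int × Int)) (plot_w : Int) (plot_h : Int) (target_width : Int) (out : List (Int × Int)) : Decidable (Spec_dilate_mask mask blocked plot_w plot_h target_width out) := by unfold Spec_dilate_mask; infer_instance

-- ===== CLAIM (what is proved, stated in full; the proofs are below) =====
def Claim_equal_dilate_mask : Prop := ∀ (mask : List (Int × Int)) (blocked : List (Int × Int)) (plot_w : Int) (plot_h : Int) (target_width : Int), Dom_dilate_mask mask blocked plot_w plot_h target_width → Spec_dilate_mask mask blocked plot_w plot_h target_width (dilate_mask mask blocked plot_w plot_h target_width)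

-- ===== LEMMAS AND PROOFS =====

-- the four neighbour cells of p, and the validity condition of both programs
def pvNbrs (p : Int × Int) : List (Int × Int) :=
  [(p.1 + 1, p.2), (p.1 - 1, p.2), (p.1, p.2 + 1), (p.1, p.2 - 1)]

abbrev pvCond (blocked : List (Int × Int)) (plot_w plot_h : Int) (q : Int × Int) : Prop :=
  0 ≤ q.1 ∧ q.1 < plot_w ∧ 0 ≤ q.2 ∧ q.2 < plot_h ∧ q ∉ blocked

-- every valid neighbour of every cell of l is already in v
def pvClosed (blocked : List (Int × Int)) (plot_w plot_h : Int)
    (v : List (Int × Int)) (l : List (Int × Int)) : Prop :=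
  ∀ p ∈ l, ∀ q ∈ pvNbrs p, pvCond blocked plot_w plot_h q → q ∈ v

set_option maxHeartbeats 1000000 in
theorem pvAStep_eq_nbrs (blocked : List (Int × Int)) (w h : Int)
    (v : PySem.Set (Int × Int)) (p : Int × Int) :
    pvAStep blocked w h v p =
      (pvNbrs p).foldl (fun v q => if pvCond blocked w h q then PySem.Set.add v q else v) v := by
  simp only [pvAStep, pvDirs, pvNbrs, pvCond, List.foldl, sub_eq_add_neg, add_zero]

set_option maxHeartbeats 1000000 in
theorem pvBStep_eq_nbrs (bl : PySem.Set (Int × Int)) (w h : Int)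
    (st : PySem.Set (Int × Int) × List (Int × Int)) (p : Int × Int) :
    pvBStep bl w h st p =
      (pvNbrs p).foldl (fun st q =>
        if pvCond bl w h q ∧ q ∉ st.1 then (PySem.Set.add st.1 q, st.2 ++ [q]) else st) st := by
  simp only [pvBStep, pvNbrs, pvCond, List.foldl, sub_eq_add_neg]

-- the core inner-fold correspondence, over an arbitrary candidate list
theorem pvInner (cA cB : Int × Int → Prop) [DecidablePred cA] [DecidablePred cB]
    (hc : ∀ q, cB q ↔ cA q) :
    ∀ (qs : List (Int × Int)) (v f : List (Int × Int)),
      (qs.foldl (fun st q => if cB q ∧ q ∉ st.1 then (PySem.Set.add st.1 q, st.2 ++ [q]) else st) (v, f)).1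
        = qs.foldl (fun v q => if cA q then PySem.Set.add v q else v) v
      ∧ (∃ t, qs.foldl (fun v q => if cA q then PySem.Set.add v q else v) v = v ++ t
          ∧ (qs.foldl (fun st q => if cB q ∧ q ∉ st.1 then (PySem.Set.add st.1 q, st.2 ++ [q]) else st) (v, f)).2 = f ++ t)
      ∧ (v.Nodup → (qs.foldl (fun v q => if cA q then PySem.Set.add v q else v) v).Nodup)
      ∧ (∀ q ∈ qs, cA q → q ∈ qs.foldl (fun v q => if cA q then PySem.Set.add v q else v) v) := by
  intro qs
  induction qs with
  | nil => intro v f; exact ⟨rfl, ⟨[], by simp, by simp⟩, fun h => h, by simp⟩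
  | cons q qs ih =>
    intro v f
    by_cases hA : cA q
    · by_cases hm : q ∈ v
      · have hB : ¬ (cB q ∧ q ∉ v) := by simp [hc, hm]
        simp only [List.foldl_cons, if_pos hA, if_neg hB,
          PySem.Set.add_of_mem hm]
        obtain ⟨h1, ⟨t, ht1, ht2⟩, h3, h4⟩ := ih v f
        refine ⟨h1, ⟨t, ht1, ht2⟩, h3, ?_⟩
        intro q' hq' hcq'
        rcases List.mem_cons.mp hq' with rfl | hq'
        · rw [ht1]; exact List.mem_append_left _ hm
        · exact h4 _ hq' hcq'
      · have hB : cB q ∧ q ∉ v := ⟨(hc q).2 hA, hm⟩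
        simp only [List.foldl_cons, if_pos hA, if_pos hB,
          PySem.Set.add_of_not_mem hm]
        obtain ⟨h1, ⟨t, ht1, ht2⟩, h3, h4⟩ := ih (v ++ [q]) (f ++ [q])
        refine ⟨h1, ⟨q :: t, by simpa using ht1, by simpa using ht2⟩, ?_, ?_⟩
        · intro hnd
          exact h3 (hnd.append (List.nodup_singleton q) (List.disjoint_singleton.mpr hm))
        · intro q' hq' hcq'
          rcases List.mem_cons.mp hq' with rfl | hq'
          · rw [ht1]; exact List.mem_append_left _ (by simp)
          · exact h4 _ hq' hcq'
    · have hB : ¬ (cB q ∧ q ∉ v) := fun h => hA ((hc q).1 h.1)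
      simp only [List.foldl_cons, if_neg hA, if_neg hB]
      obtain ⟨h1, ht, h3, h4⟩ := ih v f
      refine ⟨h1, ht, h3, ?_⟩
      intro q' hq' hcq'
      rcases List.mem_cons.mp hq' with rfl | hq'
      · exact absurd hcq' hA
      · exact h4 _ hq' hcq'

-- lift pvInner to the fold over a whole frontier list
theorem pvFrontier (blocked bl : List (Int × Int)) (w h : Int)
    (hc : ∀ q, pvCond bl w h q ↔ pvCond blocked w h q) :
    ∀ (fs : List (Int × Int)) (v f : List (Int × Int)),
      (fs.foldl (pvBStep bl w h) (v, f)).1 = fs.foldl (pvAStep blocked w h) v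
      ∧ (∃ t, fs.foldl (pvAStep blocked w h) v = v ++ t
          ∧ (fs.foldl (pvBStep bl w h) (v, f)).2 = f ++ t)
      ∧ (v.Nodup → (fs.foldl (pvAStep blocked w h) v).Nodup)
      ∧ pvClosed blocked w h (fs.foldl (pvAStep blocked w h) v) fs := by
  intro fs
  induction fs with
  | nil =>
    intro v f
    exact ⟨rfl, ⟨[], by simp, by simp⟩, fun hh => hh, by intro p hp; cases hp⟩
  | cons p fs ih =>
    intro v f
    obtain ⟨h1, ⟨t, ht1, ht2⟩, h3, h4⟩ :=
      pvInner (pvCond blocked w h) (pvCond bl w h) hc (pvNbrs p) v f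
    rw [← pvAStep_eq_nbrs] at h1 ht1 h3 h4
    rw [← pvBStep_eq_nbrs] at h1 ht2
    obtain ⟨g1, ⟨t', ht1', ht2'⟩, g3, g4⟩ := ih (pvAStep blocked w h v p) ((pvBStep bl w h (v, f) p).2)
    have hfst : pvBStep bl w h (v, f) p =
        (pvAStep blocked w h v p, (pvBStep bl w h (v, f) p).2) := by
      exact Prod.ext h1 rfl
    constructor
    · simp only [List.foldl_cons]; rw [hfst]; exact g1
    refine ⟨⟨t ++ t', ?_, ?_⟩, ?_, ?_⟩
    · simp only [List.foldl_cons]; rw [ht1', ht1, List.append_assoc]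
    · simp only [List.foldl_cons]; rw [hfst]; rw [ht2', ht2, List.append_assoc]
    · intro hnd
      simp only [List.foldl_cons]
      exact g3 (h3 hnd)
    · intro p' hp' q hq hcq
      simp only [List.foldl_cons]
      rcases List.mem_cons.mp hp' with hp0 | hp'
      · have : q ∈ pvAStep blocked w h v p := h4 q (hp0 ▸ hq) hcq
        rw [ht1'] ; exact List.mem_append_left _ this
      · exact g4 p' hp' q hq hcq

theorem pvAStep_id (blocked : List (Int × Int)) (w h : Int)
    (v : PySem.Set (Int × Int)) (p : Int × Int)
    (hcl : ∀ q ∈ pvNbrs p, pvCond blocked w h q → q ∈ v) :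
    pvAStep blocked w h v p = v := by
  rw [pvAStep_eq_nbrs]
  have : ∀ (qs : List (Int × Int)), (∀ q ∈ qs, pvCond blocked w h q → q ∈ v) →
      qs.foldl (fun v q => if pvCond blocked w h q then PySem.Set.add v q else v) v = v := by
    intro qs
    induction qs with
    | nil => intro _; rfl
    | cons q qs ih =>
      intro hq
      simp only [List.foldl_cons]
      by_cases hc : pvCond blocked w h q
      · rw [if_pos hc, PySem.Set.add_of_mem (hq q (by simp) hc)]
        exact ih fun q' hq' => hq q' (by simp [hq'])
      · rw [if_neg hc]; exact ih fun q' hq' => hq q' (by simp [hq'])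
  exact this _ hcl

theorem pvFold_id (blocked : List (Int × Int)) (w h : Int)
    (v : PySem.Set (Int × Int)) :
    ∀ (l : List (Int × Int)), pvClosed blocked w h v l →
      l.foldl (pvAStep blocked w h) v = v := by
  intro l
  induction l with
  | nil => intro _; rfl
  | cons p l ih =>
    intro hcl
    simp only [List.foldl_cons]
    rw [pvAStep_id blocked w h v p (hcl p (by simp))]
    exact ih fun p' hp' => hcl p' (by simp [hp'])

theorem pvALoop_id (blocked : List (Int × Int)) (w h : Int)
    (v : PySem.Set (Int × Int)) (hnd : v.Nodup) (hcl : pvClosed blocked w h v v) :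
    ∀ n, pvALoop blocked w h n v = v := by
  intro n
  induction n with
  | zero => rfl
  | succ n ih =>
    show pvALoop blocked w h n (pvARound blocked w h v) = v
    rw [pvARound, PySem.Set.ofList_eq_self_of_nodup _ hnd, pvFold_id blocked w h v v hcl]
    exact ih

-- main invariant: v lists A's current set as rest ++ f where f is the newest BFS layer
-- and all valid neighbours of rest are already in v
theorem pvMain (blocked bl : List (Int × Int)) (w h : Int)
    (hc : ∀ q, pvCond bl w h q ↔ pvCond blocked w h q) :
    ∀ (n : Nat) (v rest f : List (Int × Int)), v = rest ++ f →
      pvClosed blocked w h v rest → v.Nodup →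
      pvALoop blocked w h n v = pvBLoop bl w h n (v, f) := by
  intro n
  induction n with
  | zero => intro v rest f _ _ _; rfl
  | succ n ih =>
    intro v rest f hv hcl hnd
    by_cases hf : f.isEmpty
    · have hfe : f = [] := List.isEmpty_iff.mp hf
      have hvr : v = rest := by simpa [hfe] using hv
      rw [show pvBLoop bl w h (n+1) (v, f) = v by simp [pvBLoop, hf]]
      exact pvALoop_id blocked w h v hnd (hvr ▸ hcl) (n+1)
    · obtain ⟨h1, ⟨t, ht1, ht2⟩, h3, h4⟩ := pvFrontier blocked bl w h hc f v []
      have hround : pvARound blocked w h v = f.foldl (pvAStep blocked w h) v := by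
        rw [pvARound, PySem.Set.ofList_eq_self_of_nodup _ hnd]
        nth_rewrite 2 [hv]
        rw [List.foldl_append, pvFold_id blocked w h v rest hcl]
      have hB : pvBLoop bl w h (n+1) (v, f)
          = pvBLoop bl w h n (f.foldl (pvBStep bl w h) (v, [])) := by
        simp [pvBLoop, hf]
      rw [hB, show pvALoop blocked w h (n+1) v
            = pvALoop blocked w h n (pvARound blocked w h v) from rfl, hround]
      have hst : f.foldl (pvBStep bl w h) (v, []) = (f.foldl (pvAStep blocked w h) v, t) := by
        refine Prod.ext h1 ?_
        simpa using ht2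
      rw [hst]
      refine ih _ (rest ++ f) t ?_ ?_ (h3 hnd)
      · rw [ht1, hv, List.append_assoc]
      · intro p hp q hq hcq
        rw [List.mem_append] at hp
        rcases hp with hp | hp
        · have : q ∈ v := hcl p hp q hq hcq
          rw [ht1]; exact List.mem_append_left _ this
        · exact h4 p hp q hq hcq

-- ===== VERDICT (by name: the statement is the Claim_ definition above) =====
theorem dilate_mask_spec : Claim_equal_dilate_mask := by
  intro mask blocked plot_w plot_h target_width _
  unfold Spec_dilate_mask dilate_mask dilate_mask_alt
  by_cases h1 : target_width ≤ 1
  · simp [h1]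
  · simp only [if_neg h1]
    rw [PySem.List.dedup_eq_ofList]
    refine pvMain blocked (PySem.Set.ofList blocked) plot_w plot_h ?_ _
      (PySem.Set.ofList mask) [] (PySem.Set.ofList mask) rfl ?_ (PySem.Set.nodup_ofList mask)
    · intro q
      unfold pvCond
      simp [PySem.Set.mem_ofList]
    · intro p hp; cases hp
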